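-- pv_equiv track=rewrite | github.com/odysian/codewars | python/arrays/array-patterns/difference-of-2.py | twos_difference
-- ===== SOURCE A (Python) =====
-- def twos_difference(lst):
--     # Sort list and put in a set
--     sorted_lst = sorted(lst)
--     seen = set(sorted_lst)
--     result = []
--     # Loop through and check set membership
--     for num in sorted_lst:
--         if (num + 2) in seen:
--             result.append((num, num + 2))
--     return result
-- ===== SOURCE B (Python) =====
-- def twos_difference(lst):
--     # Merge-style scan over the sorted list: a chasing pointer j advances
--     # monotonically to the first element >= s[i] + 2.
--     s = sorted(lst)
--     n = len(s)
--     result = []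
--     j = 0
--     for i in range(n):
--         target = s[i] + 2
--         while j < n and s[j] < target:
--             j += 1
--         if j < n and s[j] == target:
--             result.append((s[i], target))
--     return result
-- ===== Notes on version B (the rewrite author's own statement) =====
-- stated objective: alternative
-- what changed: Replaces the auxiliary hash set and per-element membership test with a two-pointer merge-style scan over the sorted list: a monotone chasing pointer j advances to the first element >= s[i]+2 and a pair is emitted when it equals the target.
import Mathlib
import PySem

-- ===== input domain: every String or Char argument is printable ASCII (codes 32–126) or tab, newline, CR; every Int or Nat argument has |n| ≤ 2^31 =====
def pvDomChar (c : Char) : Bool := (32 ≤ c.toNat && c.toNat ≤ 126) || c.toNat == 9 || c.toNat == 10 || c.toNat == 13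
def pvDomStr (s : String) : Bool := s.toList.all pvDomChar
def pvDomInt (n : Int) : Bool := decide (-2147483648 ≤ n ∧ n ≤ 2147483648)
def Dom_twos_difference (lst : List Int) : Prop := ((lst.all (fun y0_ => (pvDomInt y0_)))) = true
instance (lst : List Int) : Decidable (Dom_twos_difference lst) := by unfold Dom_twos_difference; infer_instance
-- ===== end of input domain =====

-- B replaces A's auxiliary set + membership test with a two-pointer merge-style scan over the sorted list (alternative algorithm, same cost).


-- ===== PORT A =====
def twos_difference (lst : List Int) : List (Int × Int) :=
  let sorted_lst := PySem.List.sorted lst (fun x => x) false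
  let seen : PySem.Set Int := PySem.Set.ofList sorted_lst
  let result := sorted_lst.foldl (fun result num =>
    if PySem.Set.contains seen (num + 2) then result ++ [(num, num + 2)] else result) []
  result

-- ===== PORT B =====
-- the inner 'while j < n and s[j] < target: j += 1'
def twosAdvance (s : List Int) (target : Int) (j : Nat) : Nat :=
  if h : j < s.length then
    if s[j] < target then twosAdvance s target (j + 1) else j
  else j
termination_by s.length - j

-- the outer 'for i in range(n)' loop of Source B
def twosLoop (s : List Int) (i j : Nat) (result : List (Int × Int)) : List (Int × Int) :=
  if h : i < s.length then
    let target := s[i] + 2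
    let j' := twosAdvance s target j
    let result' :=
      if h2 : j' < s.length then
        if s[j'] = target then result ++ [(s[i], target)] else result
      else result
    twosLoop s (i + 1) j' result'
  else result
termination_by s.length - i

def twos_difference_alt (lst : List Int) : List (Int × Int) :=
  twosLoop (PySem.List.sorted lst (fun x => x) false) 0 0 []

-- ===== PRECONDITION & SPEC =====
def Spec_twos_difference (lst : List Int) (out : List (Int × Int)) : Prop := out = twos_difference_alt lst
instance (lst : List Int) (out : List (Int × Int)) : Decidable (Spec_twos_difference lst out) := by unfold Spec_twos_difference; infer_instance

-- ===== CLAIM (what is proved, stated in full; the proofs are below) =====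
def Claim_equal_twos_difference : Prop := ∀ (lst : List Int), Dom_twos_difference lst → Spec_twos_difference lst (twos_difference lst)

-- ===== LEMMAS AND PROOFS =====

-- twosAdvance j returns the first index j' ≥ j with s[j'] ≥ target (or s.length)
theorem twosAdvance_spec (s : List Int) (t : Int) (j : Nat) (hj : j ≤ s.length) :
    j ≤ twosAdvance s t j ∧ twosAdvance s t j ≤ s.length ∧
    (∀ k, j ≤ k → k < twosAdvance s t j → ∀ (hk : k < s.length), s[k] < t) ∧
    (∀ (h : twosAdvance s t j < s.length), ¬ s[twosAdvance s t j] < t) := by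
  rw [twosAdvance]
  by_cases h : j < s.length
  · simp only [dif_pos h]
    by_cases hlt : s[j] < t
    · simp only [if_pos hlt]
      obtain ⟨h1, h2, h3, h4⟩ := twosAdvance_spec s t (j + 1) (by omega)
      refine ⟨by omega, h2, ?_, h4⟩
      intro k hk1 hk2 hk
      rcases Nat.eq_or_lt_of_le hk1 with rfl | hk1'
      · exact hlt
      · exact h3 k (by omega) hk2 hk
    · simp only [if_neg hlt]
      exact ⟨le_refl _, le_of_lt h, by omega, fun _ => hlt⟩
  · simp only [dif_neg h]
    exact ⟨le_refl _, hj, by omega, fun h' => absurd h' h⟩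
termination_by s.length - j

-- main loop invariant: twosLoop computes the filter of the suffix from i
theorem twosLoop_eq (s : List Int)
    (hmono : ∀ (p q : Nat) (hpq : p ≤ q) (hq : q < s.length), s[p]'(lt_of_le_of_lt hpq hq) ≤ s[q])
    (i j : Nat) (result : List (Int × Int)) (hj : j ≤ s.length)
    (hinv : ∀ k, k < j → ∀ (hk : k < s.length) (hi : i < s.length), s[k] < s[i] + 2) :
    twosLoop s i j result =
      result ++ ((s.drop i).filter (fun n => decide ((n + 2) ∈ s))).map (fun n => (n, n + 2)) := by
  rw [twosLoop]
  by_cases h : i < s.length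
  · simp only [dif_pos h]
    obtain ⟨ha1, ha2, ha3, ha4⟩ := twosAdvance_spec s (s[i] + 2) j hj
    set j' := twosAdvance s (s[i] + 2) j with hj'def
    have hbefore : ∀ k, k < j' → ∀ (hk : k < s.length), s[k] < s[i] + 2 := by
      intro k hk1 hk
      by_cases hkj : k < j
      · exact hinv k hkj hk h
      · exact ha3 k (by omega) hk1 hk
    -- the found condition is exactly membership of the target
    have hiff : ((s[i] + 2) ∈ s) ↔ (∃ (h2 : j' < s.length), s[j'] = s[i] + 2) := by
      constructor
      · intro hm
        obtain ⟨m, hm1, hm2⟩ := List.mem_iff_getElem.mp hm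
        have hj'm : j' ≤ m := by
          by_contra hc
          exact absurd hm2 (ne_of_lt (hbefore m (by omega) hm1))
        have hj2 : j' < s.length := lt_of_le_of_lt hj'm hm1
        refine ⟨hj2, le_antisymm (hm2 ▸ hmono j' m hj'm hm1) (not_lt.mp (ha4 hj2))⟩
      · rintro ⟨h2, heq⟩
        exact heq ▸ List.getElem_mem h2
    rw [List.drop_eq_getElem_cons h, List.filter_cons]
    have hnext : ∀ k, k < j' → ∀ (hk : k < s.length) (hi1 : i + 1 < s.length), s[k] < s[i + 1] + 2 := by
      intro k hk1 hk hi1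
      have := hmono i (i + 1) (by omega) hi1
      have := hbefore k hk1 hk
      omega
    by_cases hm : (s[i] + 2) ∈ s
    · obtain ⟨h2, heq⟩ := hiff.mp hm
      simp only [dif_pos h2, if_pos heq, hm, decide_true, if_pos]
      rw [twosLoop_eq s hmono (i + 1) j' _ ha2 hnext]
      simp
    · have hres : (if h2 : j' < s.length then
          (if s[j'] = s[i] + 2 then result ++ [(s[i], s[i] + 2)] else result) else result) = result := by
        split_ifs with h2 heq
        · exact absurd (hiff.mpr ⟨h2, heq⟩) hm
        · rfl
        · rfl
      rw [hres, twosLoop_eq s hmono (i + 1) j' _ ha2 hnext]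
      simp [hm]
  · simp only [dif_neg h]
    rw [List.drop_of_length_le (by omega)]
    simp
termination_by s.length - i

-- ===== VERDICT (by name: the statement is the Claim_ definition above) =====
theorem twos_difference_spec : Claim_equal_twos_difference := by
  intro lst _
  unfold Spec_twos_difference twos_difference twos_difference_alt
  set s := PySem.List.sorted lst (fun x => x) false with hs
  dsimp only
  rw [PySem.List.foldl_append_if (fun num => PySem.Set.contains (PySem.Set.ofList s) (num + 2))
    (fun num => (num, num + 2)) s []]
  have hmono : ∀ (p q : Nat) (hpq : p ≤ q) (hq : q < s.length),
      s[p]'(lt_of_le_of_lt hpq hq) ≤ s[q] := by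
    intro p q hpq hq
    exact PySem.List.sorted_id_getElem_mono lst hpq hq
  rw [twosLoop_eq s hmono 0 0 [] (by omega) (by omega)]
  simp only [List.drop_zero, List.nil_append]
  congr 1
  apply List.filter_congr
  intro x _
  simp [PySem.Set.contains]
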